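-- pv_equiv track=rewrite | github.com/aamelegy/Problems | acmicpc/level2/phase1/SRM408DivII500.py | numberOfNights
-- ===== SOURCE A (Python) =====
-- def numberOfNights(candles):
--     n=1
--     candles=list(candles)
--     while True:
--         candles.sort(reverse=True)
--         for i in range(n):
--             if i==len(candles) or candles[i]==0:
--                 return n-1
--             else:
--                 candles[i]-=1
--         n+=1
-- ===== SOURCE B (Python) =====
-- def _merge_desc(xs, ys):
--     res = []
--     i = j = 0
--     while i < len(xs) and j < len(ys):
--         if xs[i] >= ys[j]:
--             res.append(xs[i]); i += 1
--         else:
--             res.append(ys[j]); j += 1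
--     res.extend(xs[i:])
--     res.extend(ys[j:])
--     return res
--
-- def numberOfNights(candles):
--     # sort once; keep the state sorted descending by merging the decremented
--     # prefix back in, instead of re-sorting the whole list every night
--     s = sorted(candles, reverse=True)
--     m = len(s)
--     n = 1
--     while n <= m and 0 not in s[:n]:
--         s = _merge_desc([x - 1 for x in s[:n]], s[n:])
--         n += 1
--     return n - 1
-- ===== Notes on version B (the rewrite author's own statement) =====
-- stated objective: alternative
-- what changed: B sorts the candle list once and keeps the state sorted descending by linearly merging the decremented prefix back in, testing the stop condition directly on the sorted state, instead of A's full re-sort of the mutated list at every night with an early-return scan.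
import Mathlib
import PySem

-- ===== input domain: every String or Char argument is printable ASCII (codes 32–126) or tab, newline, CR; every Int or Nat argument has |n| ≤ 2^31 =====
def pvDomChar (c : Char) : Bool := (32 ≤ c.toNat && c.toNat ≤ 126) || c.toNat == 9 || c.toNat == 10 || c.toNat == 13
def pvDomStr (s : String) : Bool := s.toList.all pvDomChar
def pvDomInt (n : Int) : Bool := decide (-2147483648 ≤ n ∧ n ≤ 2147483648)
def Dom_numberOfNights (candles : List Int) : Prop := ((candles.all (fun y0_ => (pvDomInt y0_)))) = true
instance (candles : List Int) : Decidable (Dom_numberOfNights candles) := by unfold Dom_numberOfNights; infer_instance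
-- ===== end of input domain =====

-- B sorts once and keeps the state sorted by a linear merge of the decremented prefix,
-- instead of A's full re-sort every night (alternative mechanism, same results).

-- ===== PORT A =====
-- the for-loop body 'for i in range(n): if i==len(candles) or candles[i]==0: return n-1
-- else: candles[i]-=1' as the obvious structural scan over the same state: consuming the
-- list head-first IS walking index i upward; 'none' = the early 'return n-1'.
def pvNightA (s : List Int) (n : Nat) : Option (List Int) :=
  match n, s with
  | 0, s => some s
  | _+1, [] => none                      -- i == len(candles)
  | m+1, x :: xs =>
      if x = 0 then none                 -- candles[i] == 0
      else
        match pvNightA xs m with         -- continue the for loop on the rest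
        | none => none
        | some ys => some ((x - 1) :: ys)   -- candles[i] -= 1

-- used by pvLoopA's decreasing_by
theorem pvNightA_some_len (s : List Int) (n : Nat) (t : List Int)
    (h : pvNightA s n = some t) : n ≤ s.length ∧ t.length = s.length := by
  induction s generalizing n t with
  | nil => cases n <;> simp_all [pvNightA]
  | cons x xs ih =>
      cases n with
      | zero => simp [pvNightA] at h; simp [← h]
      | succ m =>
          simp only [pvNightA] at h
          by_cases hx : x = 0
          · simp [hx] at h
          · simp only [if_neg hx] at h
            cases hr : pvNightA xs m with
            | none => rw [hr] at h; simp at h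
            | some ys =>
                rw [hr] at h
                simp only [Option.some.injEq] at h
                obtain ⟨h1, h2⟩ := ih m ys hr
                simp [← h, List.length_cons]; omega

-- the 'while True' loop of A: sort descending, run one night, stop or continue with n+1
def pvLoopA (s : List Int) (n : Nat) : Int :=
  match h : pvNightA (PySem.List.sorted s (fun x => x) true) n with
  | none => (n : Int) - 1
  | some t => pvLoopA t (n + 1)
termination_by s.length + 2 - n
decreasing_by
  obtain ⟨h1, h2⟩ := pvNightA_some_len _ _ _ h
  rw [PySem.List.length_sorted] at h1 h2
  omega

def numberOfNights (candles : List Int) : Int := pvLoopA candles 1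

-- ===== PORT B =====
-- _merge_desc from Source B: two-pointer merge of two descending lists
def pvMergeDesc : List Int → List Int → List Int
  | [], ys => ys
  | x :: xs, [] => x :: xs
  | x :: xs, y :: ys =>
      if x ≥ y then x :: pvMergeDesc xs (y :: ys)
      else y :: pvMergeDesc (x :: xs) ys

-- used by pvLoopB's decreasing_by
theorem pvMergeDesc_length (xs ys : List Int) :
    (pvMergeDesc xs ys).length = xs.length + ys.length := by
  induction xs generalizing ys with
  | nil => simp [pvMergeDesc]
  | cons x xs ih =>
      induction ys with
      | nil => simp [pvMergeDesc]
      | cons y ys ihy =>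
          simp only [pvMergeDesc]
          split <;> simp [ih, ihy, List.length_cons] <;> omega

-- B's while loop: state s is kept sorted descending
def pvLoopB (s : List Int) (n : Nat) : Int :=
  if n ≤ s.length ∧ ¬ (0 ∈ s.take n) then
    pvLoopB (pvMergeDesc ((s.take n).map (· - 1)) (s.drop n)) (n + 1)
  else (n : Int) - 1
termination_by s.length + 2 - n
decreasing_by
  rename_i hcond
  rw [pvMergeDesc_length]
  simp only [List.length_map, List.length_take, List.length_drop]
  omega

def numberOfNights_alt (candles : List Int) : Int :=
  pvLoopB (PySem.List.sorted candles (fun x => x) true) 1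

-- ===== PRECONDITION & SPEC =====
def Spec_numberOfNights (candles : List Int) (out : Int) : Prop := out = numberOfNights_alt candles
instance (candles : List Int) (out : Int) : Decidable (Spec_numberOfNights candles out) := by unfold Spec_numberOfNights; infer_instance

-- ===== CLAIM (what is proved, stated in full; the proofs are below) =====
def Claim_equal_numberOfNights : Prop := ∀ (candles : List Int), Dom_numberOfNights candles → Spec_numberOfNights candles (numberOfNights candles)

-- ===== LEMMAS AND PROOFS =====

-- A's night pass aborts exactly when B's loop condition fails
theorem pvNightA_eq_none_iff (s : List Int) (n : Nat) :
    pvNightA s n = none ↔ (s.length < n ∨ 0 ∈ s.take n) := by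
  induction s generalizing n with
  | nil => cases n <;> simp [pvNightA]
  | cons x xs ih =>
      cases n with
      | zero => simp [pvNightA]
      | succ m =>
          simp only [pvNightA]
          by_cases hx : x = 0
          · simp [hx, List.take_succ_cons]
          · simp only [if_neg hx]
            cases hr : pvNightA xs m with
            | none =>
                simp only [true_iff]
                have := (ih m).mp hr
                simp [List.take_succ_cons, Ne.symm hx]
                omega
            | some ys =>
                have := (ih m).not.mp (by simp [hr])
                push Not at this
                simp [List.take_succ_cons, Ne.symm hx]
                omega

-- A's successful night pass decrements the first n elements
theorem pvNightA_eq_some (s : List Int) (n : Nat) (t : List Int)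
    (h : pvNightA s n = some t) : t = (s.take n).map (· - 1) ++ s.drop n := by
  induction s generalizing n t with
  | nil => cases n <;> simp_all [pvNightA]
  | cons x xs ih =>
      cases n with
      | zero => simp [pvNightA] at h; simp [← h]
      | succ m =>
          simp only [pvNightA] at h
          by_cases hx : x = 0
          · simp [hx] at h
          · simp only [if_neg hx] at h
            cases hr : pvNightA xs m with
            | none => rw [hr] at h; simp at h
            | some ys =>
                rw [hr] at h
                simp only [Option.some.injEq] at h
                simp [← h, List.take_succ_cons, List.drop_succ_cons, ih m ys hr]

-- B's merge is a permutation of the concatenation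
theorem pvMergeDesc_perm (xs ys : List Int) :
    (pvMergeDesc xs ys).Perm (xs ++ ys) := by
  induction xs generalizing ys with
  | nil => simp [pvMergeDesc]
  | cons x xs ih =>
      induction ys with
      | nil => simp [pvMergeDesc]
      | cons y ys ihy =>
          simp only [pvMergeDesc]
          split
          · exact List.Perm.cons x (ih (y :: ys))
          · refine List.Perm.trans (List.Perm.cons y ihy) ?_
            exact (List.perm_middle).symm

-- B's merge of two descending lists is descending
theorem pvMergeDesc_pairwise (xs ys : List Int)
    (hx : xs.Pairwise (fun a b => b ≤ a)) (hy : ys.Pairwise (fun a b => b ≤ a)) :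
    (pvMergeDesc xs ys).Pairwise (fun a b => b ≤ a) := by
  induction xs generalizing ys with
  | nil => simpa [pvMergeDesc] using hy
  | cons x xs ih =>
      induction ys with
      | nil => simpa [pvMergeDesc] using hx
      | cons y ys ihy =>
          simp only [pvMergeDesc]
          rcases List.pairwise_cons.mp hx with ⟨hx1, hx2⟩
          rcases List.pairwise_cons.mp hy with ⟨hy1, hy2⟩
          split
          · rename_i hge
            refine List.pairwise_cons.mpr ⟨?_, ih (y :: ys) hx2 hy⟩
            intro a ha
            have := (pvMergeDesc_perm xs (y :: ys)).mem_iff.mp ha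
            rcases List.mem_append.mp this with h1 | h2
            · exact hx1 a h1
            · rcases List.mem_cons.mp h2 with rfl | h3
              · exact hge
              · exact le_trans (hy1 a h3) hge
          · rename_i hlt
            push Not at hlt
            refine List.pairwise_cons.mpr ⟨?_, ihy hy2⟩
            intro a ha
            have := (pvMergeDesc_perm (x :: xs) ys).mem_iff.mp ha
            rcases List.mem_append.mp this with h1 | h2
            · rcases List.mem_cons.mp h1 with rfl | h3
              · exact le_of_lt hlt
              · exact le_trans (hx1 a h3) (le_of_lt hlt)
            · exact hy1 a h2

-- a descending rearrangement of xs IS sorted(xs, reverse=True)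
theorem pvSortedDesc_unique (xs ys : List Int)
    (hperm : ys.Perm xs) (hp : ys.Pairwise (fun a b => b ≤ a)) :
    PySem.List.sorted xs (fun x => x) true = ys := by
  refine List.Perm.eq_of_pairwise (fun a b _ _ h1 h2 => le_antisymm h2 h1) ?_ hp
    ((PySem.List.sorted_perm xs (fun x => x) true).trans hperm.symm)
  simpa using PySem.List.sorted_pairwise_rev xs (fun x => x)

-- main loop correspondence: A's loop on any state = B's loop on the sorted state
theorem pvLoop_eq (k : Nat) : ∀ (s : List Int) (n : Nat), s.length + 2 - n ≤ k →
    pvLoopA s n = pvLoopB (PySem.List.sorted s (fun x => x) true) n := by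
  induction k with
  | zero =>
      intro s n h
      rw [pvLoopA]
      split
      · rename_i hA
        rw [pvLoopB, if_neg (fun hcond => absurd hcond.1
            (by rw [PySem.List.length_sorted]; omega))]
      · rename_i t' hA
        have := (pvNightA_some_len _ _ _ hA).1
        rw [PySem.List.length_sorted] at this
        omega
  | succ k ih =>
      intro s n hk
      set t := PySem.List.sorted s (fun x => x) true with ht
      have htlen : t.length = s.length := PySem.List.length_sorted s _ _
      rw [pvLoopA]
      split
      · rename_i hA
        have hdisj := (pvNightA_eq_none_iff t n).mp hA
        rw [pvLoopB, if_neg (fun hcond => by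
          rcases hdisj with h2 | h2
          · omega
          · exact hcond.2 h2)]
      · rename_i t' hA
        have hcond := (pvNightA_eq_none_iff t n).not.mp (by rw [hA]; intro hx; cases hx)
        push Not at hcond
        obtain ⟨hle, hnz⟩ := hcond
        have ht' := pvNightA_eq_some t n t' hA
        have ht'len : t'.length = t.length := (pvNightA_some_len t n t' hA).2
        -- B takes the loop branch
        rw [pvLoopB, if_pos ⟨by omega, hnz⟩]
        -- the merged state is exactly sorted(t', reverse=True)
        have hpw : t.Pairwise (fun a b => b ≤ a) := by
          simpa using PySem.List.sorted_pairwise_rev s (fun x => x)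
        have hmerge :
            PySem.List.sorted t' (fun x => x) true =
            pvMergeDesc ((t.take n).map (· - 1)) (t.drop n) := by
          refine pvSortedDesc_unique t' _ ?_ ?_
          · exact ((pvMergeDesc_perm _ _).trans (by rw [ht'])).symm.symm
          · refine pvMergeDesc_pairwise _ _ ?_ (hpw.drop)
            exact (hpw.take).map _ (by intro a b hab; simpa using hab)
        rw [ih t' (n + 1) (by omega), hmerge]

-- ===== VERDICT (by name: the statement is the Claim_ definition above) =====
theorem numberOfNights_spec : Claim_equal_numberOfNights := by
  intro candles _
  unfold Spec_numberOfNights numberOfNights numberOfNights_alt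
  exact pvLoop_eq (candles.length + 2) candles 1 (by omega)
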